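-- pv_equiv track=rewrite | github.com/lichkingwulaa/Codewars | Rectangle into Squares.py | sqInRect1
-- ===== SOURCE A (Python) =====
-- def sqInRect1(a, b):
-- 	if a == b:
-- 		return None
-- 	res = []
-- 	while b:
-- 		b, a = sorted([a, b])
-- 		res += [b]
-- 		a, b = b, a - b
-- 	return res
-- ===== SOURCE B (Python) =====
-- def squares(a, b):
--     if a <= 0 or b <= 0:
--         return []
--     lo, hi = min(a, b), max(a, b)
--     return [lo] * (hi // lo) + squares(hi % lo, lo)
--
-- def sqInRect1(a, b):
--     if a == b:
--         return None
--     return squares(a, b)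
-- ===== Notes on version B (the rewrite author's own statement) =====
-- stated objective: faster
-- what changed: Replaces A's imperative one-square-per-subtraction accumulator loop with a pure recursive function that emits each whole run of equal squares at once via [lo]*(hi//lo) and recurses on (hi%lo, lo), i.e. Euclid's algorithm instead of repeated subtraction.
import Mathlib
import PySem

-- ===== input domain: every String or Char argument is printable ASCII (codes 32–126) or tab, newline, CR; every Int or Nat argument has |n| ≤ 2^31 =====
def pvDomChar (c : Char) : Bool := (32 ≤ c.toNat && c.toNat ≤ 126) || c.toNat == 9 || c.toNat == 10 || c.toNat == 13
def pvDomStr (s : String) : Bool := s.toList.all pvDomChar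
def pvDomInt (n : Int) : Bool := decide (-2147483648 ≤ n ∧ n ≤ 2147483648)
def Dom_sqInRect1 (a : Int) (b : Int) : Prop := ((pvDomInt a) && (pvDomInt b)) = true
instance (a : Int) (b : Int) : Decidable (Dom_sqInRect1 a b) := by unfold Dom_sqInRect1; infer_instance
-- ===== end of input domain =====

-- B replaces A's imperative one-square-per-subtraction accumulator loop with a pure
-- Euclid-style recursion emitting each run of equal squares at once: O(log) steps.

-- ===== PORT A =====
-- A's while loop: 'while b: b,a = sorted([a,b]); res += [b]; a,b = b, a-b'.
-- The loop terminates exactly on the inputs admitted by Pre_; fuel (a+b).toNat+1 only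
-- makes the recursion total and is proved sufficient there.
def loopA : Nat → Int → Int → List Int → List Int
  | 0, _, _, res => res
  | f+1, a, b, res =>
    if b = 0 then res
    else loopA f (min a b) (max a b - min a b) (res ++ [min a b])

def sqInRect1 (a : Int) (b : Int) : Option (List Int) :=
  if a = b then none else some (loopA ((a + b).toNat + 1) a b [])

-- ===== PORT B =====
-- B's helper 'squares': if a <= 0 or b <= 0: []; lo,hi = min,max; [lo]*(hi//lo) + squares(hi%lo, lo).
-- Well-founded recursion on (a+b).toNat replaces Python's call stack; exact otherwise.
def squaresB (a : Int) (b : Int) : List Int :=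
  if h : a ≤ 0 ∨ b ≤ 0 then []
  else
    List.replicate (PySem.Int.floordiv (max a b) (min a b)).toNat (min a b)
      ++ squaresB (PySem.Int.mod (max a b) (min a b)) (min a b)
termination_by (a + b).toNat
decreasing_by
  have hlo : 0 < min a b := by omega
  have h1 := PySem.Int.mod_nonneg (max a b) hlo
  have h2 := PySem.Int.mod_lt (max a b) hlo
  omega

def sqInRect1_alt (a : Int) (b : Int) : Option (List Int) :=
  if a = b then none else some (squaresB a b)

-- ===== PRECONDITION & SPEC =====
-- Pre_ excludes exactly the inputs on which A's while loop never terminates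
-- (b ≠ 0 together with a ≤ 0 or b < 0): there Python A diverges and returns nothing.
def Pre_sqInRect1 (a : Int) (b : Int) : Prop := a = b ∨ b = 0 ∨ (0 < a ∧ 0 < b)
instance (a : Int) (b : Int) : Decidable (Pre_sqInRect1 a b) := by unfold Pre_sqInRect1; infer_instance
def pvWitness_sqInRect1 : Int × Int := (5, 3)

def Spec_sqInRect1 (a : Int) (b : Int) (out : Option (List Int)) : Prop := out = sqInRect1_alt a b
instance (a : Int) (b : Int) (out : Option (List Int)) : Decidable (Spec_sqInRect1 a b out) := by unfold Spec_sqInRect1; infer_instance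

-- ===== CLAIM (what is proved, stated in full; the proofs are below) =====
def Claim_equal_sqInRect1 : Prop := ∀ (a : Int) (b : Int), Dom_sqInRect1 a b → Pre_sqInRect1 a b → Spec_sqInRect1 a b (sqInRect1 a b)

-- ===== LEMMAS AND PROOFS =====

lemma squaresB_eq (a b : Int) : squaresB a b =
    if a ≤ 0 ∨ b ≤ 0 then []
    else
      List.replicate (PySem.Int.floordiv (max a b) (min a b)).toNat (min a b)
        ++ squaresB (PySem.Int.mod (max a b) (min a b)) (min a b) := by
  rw [squaresB]
  by_cases h : a ≤ 0 ∨ b ≤ 0 <;> simp [h]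

lemma squaresB_symm (a b : Int) : squaresB a b = squaresB b a := by
  rw [squaresB_eq a b, squaresB_eq b a, min_comm b a, max_comm b a]
  by_cases h : a ≤ 0 ∨ b ≤ 0
  · rw [if_pos h, if_pos h.symm]
  · rw [if_neg h, if_neg (fun h' => h h'.symm)]

lemma squaresB_zero_right (a : Int) : squaresB a 0 = [] := by
  rw [squaresB_eq]; simp

lemma loopA_bzero (f : Nat) (a : Int) (res : List Int) : loopA f a 0 res = res := by
  cases f <;> simp [loopA]

-- one subtraction step of A, expressed on squaresB
lemma squaresB_sub (a b : Int) (hb : 0 < b) (hlt : b < a) :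
    squaresB a b = b :: squaresB b (a - b) := by
  have hqr := PySem.Int.floordiv_mul_add_mod a b
  have hr0 := PySem.Int.mod_nonneg a hb
  have hr1 := PySem.Int.mod_lt a hb
  have hq1 : 1 ≤ PySem.Int.floordiv a b :=
    (PySem.Int.le_floordiv_iff_mul_le hb).mpr (by omega)
  rw [squaresB_eq a b, if_neg (by omega : ¬ (a ≤ 0 ∨ b ≤ 0)),
      min_eq_right (le_of_lt hlt), max_eq_left (le_of_lt hlt)]
  rcases eq_or_lt_of_le hq1 with hq | hq
  · -- quotient 1 : a < 2b, remainder a - b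
    have hr : PySem.Int.mod a b = a - b := by
      have : PySem.Int.floordiv a b * b = 1 * b := by rw [← hq]
      omega
    rw [← hq, hr, squaresB_symm b (a - b)]
    simp
  · -- quotient ≥ 2 : b ≤ a - b; peel one square b off the bulk block
    have hq2 : 2 ≤ PySem.Int.floordiv a b := hq
    have hbb : 2 * b ≤ PySem.Int.floordiv a b * b :=
      mul_le_mul_of_nonneg_right hq2 (le_of_lt hb)
    have hab : b ≤ a - b := by omega
    have hfd' : PySem.Int.floordiv (a - b) b = PySem.Int.floordiv a b - 1 := by
      rw [PySem.Int.floordiv_eq_iff_of_pos hb]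
      constructor
      · have : (PySem.Int.floordiv a b - 1) * b = PySem.Int.floordiv a b * b - 1 * b := by ring
        omega
      · have : (PySem.Int.floordiv a b - 1 + 1) * b = PySem.Int.floordiv a b * b := by ring
        omega
    have hmd' : PySem.Int.mod (a - b) b = PySem.Int.mod a b := by
      have h2 := PySem.Int.floordiv_mul_add_mod (a - b) b
      rw [hfd'] at h2
      have : (PySem.Int.floordiv a b - 1) * b = PySem.Int.floordiv a b * b - 1 * b := by ring
      omega
    rw [squaresB_eq b (a - b), if_neg (by omega : ¬ (b ≤ 0 ∨ a - b ≤ 0)),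
        min_eq_left hab, max_eq_right hab, hfd', hmd']
    have ht : (PySem.Int.floordiv a b).toNat = (PySem.Int.floordiv a b - 1).toNat + 1 := by omega
    rw [ht, List.replicate_succ]
    simp

lemma squaresB_self (b : Int) (hb : 0 < b) : squaresB b b = [b] := by
  rw [squaresB_eq, if_neg (by omega : ¬ (b ≤ 0 ∨ b ≤ 0)), min_self, max_self]
  have h1 : PySem.Int.floordiv b b = 1 :=
    (PySem.Int.floordiv_eq_iff_of_pos hb).mpr (by constructor <;> omega)
  have h2 : PySem.Int.mod b b = 0 := (PySem.Int.mod_eq_zero_iff_dvd b b).mpr dvd_rfl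
  rw [h1, h2]
  rw [squaresB_eq 0 b, if_pos (Or.inl le_rfl)]
  simp

lemma loopA_eq_squaresB : ∀ (f : Nat) (a b : Int) (res : List Int),
    0 < a → 0 < b → (a + b).toNat ≤ f → loopA f a b res = res ++ squaresB a b := by
  intro f
  induction f with
  | zero => intro a b res ha hb h; omega
  | succ f ih =>
    intro a b res ha hb h
    rw [loopA, if_neg (ne_of_gt hb)]
    rcases lt_trichotomy b a with hlt | heq | hgt
    · -- b < a : min = b, step to (b, a - b)
      rw [min_eq_right (le_of_lt hlt), max_eq_left (le_of_lt hlt)]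
      rw [ih b (a - b) (res ++ [b]) hb (by omega) (by omega)]
      rw [squaresB_sub a b hb hlt]
      simp
    · -- a = b : one square a, then second component 0
      subst heq
      rw [min_self, max_self, sub_self, loopA_bzero, squaresB_self b hb]
    · -- a < b : min = a, step to (a, b - a)
      rw [min_eq_left (le_of_lt hgt), max_eq_right (le_of_lt hgt)]
      rw [ih a (b - a) (res ++ [a]) ha (by omega) (by omega)]
      rw [squaresB_symm a b, squaresB_sub b a ha hgt, squaresB_symm a (b - a)]
      simp

-- ===== VERDICT (by name: the statement is the Claim_ definition above) =====
theorem sqInRect1_spec : Claim_equal_sqInRect1 := by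
  intro a b _ hpre
  unfold Spec_sqInRect1 sqInRect1 sqInRect1_alt
  by_cases hab : a = b
  · simp [hab]
  · rw [if_neg hab, if_neg hab]
    rcases hpre with h | h | h
    · exact absurd h hab
    · subst h
      rw [loopA_bzero, squaresB_zero_right]
    · rw [loopA_eq_squaresB _ a b [] h.1 h.2 (by omega)]
      simp
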